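-- pv_equiv track=rewrite | github.com/MicheleGiraudo73/Sistemi21_22 | Compiti_Vacanze/TwelveDays.py | song
-- ===== SOURCE A (Python) =====
-- regali = [
--     " a Partridge in a Pear Tree.",
--     " two Turtle Doves, and",
--     " three French Hens,",
--     " four Calling Birds,",
--     " five Gold Rings,",
--     " six Geese-a-Laying,",
--     " seven Swans-a-Swimming,",
--     " eight Maids-a-Milking,",
--     " nine Ladies Dancing,",
--     " ten Lords-a-Leaping,",
--     " eleven Pipers Piping,",
--     " twelve Drummers Drumming,",
-- ]
--
-- giorni = [
--     "first",
--     "second",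
--     "third",
--     "fourth",
--     "fifth",
--     "sixth",
--     "seventh",
--     "eighth",
--     "ninth",
--     "tenth",
--     "eleventh",
--     "twelfth",
-- ]
--
-- def song(verso1,verso2):
--     canzone = []
--     for giorno in range(verso1 - 1, verso2):
--         frase = f"On the {giorni[giorno]} day of Christmas my true love gave to me:"
--         for regalo in range(giorno, -1, -1):
--             frase += regali[regalo]
--         canzone.append(frase)
--     return canzone
-- ===== SOURCE B (Python) =====
-- regali = [
--     " a Partridge in a Pear Tree.",
--     " two Turtle Doves, and",
--     " three French Hens,",
--     " four Calling Birds,",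
--     " five Gold Rings,",
--     " six Geese-a-Laying,",
--     " seven Swans-a-Swimming,",
--     " eight Maids-a-Milking,",
--     " nine Ladies Dancing,",
--     " ten Lords-a-Leaping,",
--     " eleven Pipers Piping,",
--     " twelve Drummers Drumming,",
-- ]
--
-- giorni = [
--     "first",
--     "second",
--     "third",
--     "fourth",
--     "fifth",
--     "sixth",
--     "seventh",
--     "eighth",
--     "ninth",
--     "tenth",
--     "eleventh",
--     "twelfth",
-- ]
--
-- def song(verso1, verso2):
--     # single pass with an incrementally grown gift suffix; days below 1 do not exist
--     start = max(verso1 - 1, 0)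
--     frase_regali = "".join(reversed(regali[:start]))
--     canzone = []
--     for giorno in range(start, verso2):
--         frase_regali = regali[giorno] + frase_regali
--         canzone.append(f"On the {giorni[giorno]} day of Christmas my true love gave to me:" + frase_regali)
--     return canzone
-- ===== Notes on version B (the rewrite author's own statement) =====
-- stated objective: alternative
-- what changed: Replaces A's nested rebuild (inner countdown loop reconcatenating all gifts for every verse) with a single pass that grows the gift suffix incrementally, prepending one gift per day, starting at day 1 (max(verso1-1,0)).
-- intended difference: On verso1 <= 0 with verso1 <= verso2, A's negative-index wraparound returns ghost verses for nonexistent days (e.g. 'On the twelfth day ... me:' with no gifts); B returns only the verses for days 1..verso2, the intended first day of the song being 1. — e.g. on song(0, 1): A returns ["On the twelfth day of Christmas my true love gave to me:", "On the first day of Christmas my true love gave to me: a …, B returns ["On the first day of Christmas my true love gave to me: a Partridge in a Pear Tree."]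
import Mathlib
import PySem

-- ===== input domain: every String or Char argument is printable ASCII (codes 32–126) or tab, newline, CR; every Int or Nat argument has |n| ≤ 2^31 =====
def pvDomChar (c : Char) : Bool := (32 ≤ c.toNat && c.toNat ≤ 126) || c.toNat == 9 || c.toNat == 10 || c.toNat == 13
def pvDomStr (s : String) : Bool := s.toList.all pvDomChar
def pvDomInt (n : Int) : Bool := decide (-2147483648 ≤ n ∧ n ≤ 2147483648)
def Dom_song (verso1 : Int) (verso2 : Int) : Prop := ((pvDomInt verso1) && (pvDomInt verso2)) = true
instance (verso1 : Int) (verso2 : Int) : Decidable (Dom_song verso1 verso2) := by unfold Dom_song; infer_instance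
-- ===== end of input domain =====

-- B replaces A's per-verse inner rebuild of the gift list by a single pass that grows the
-- gift suffix incrementally (alternative decomposition; equivalence is about the return value).

def regaliA : List String := [
  " a Partridge in a Pear Tree.",
  " two Turtle Doves, and",
  " three French Hens,",
  " four Calling Birds,",
  " five Gold Rings,",
  " six Geese-a-Laying,",
  " seven Swans-a-Swimming,",
  " eight Maids-a-Milking,",
  " nine Ladies Dancing,",
  " ten Lords-a-Leaping,",
  " eleven Pipers Piping,",
  " twelve Drummers Drumming,"]

def giorniA : List String := ["first","second","third","fourth","fifth","sixth",
  "seventh","eighth","ninth","tenth","eleventh","twelfth"]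

-- ===== PORT A =====
-- the body of A's outer loop: header f-string, then the countdown inner loop appending gifts
def verseA (giorno : Int) : String :=
  (PySem.List.pyRange giorno (-1) (-1)).foldl
    (fun frase regalo => frase ++ PySem.List.pyGetD regaliA regalo "")
    ("On the " ++ PySem.List.pyGetD giorniA giorno "" ++ " day of Christmas my true love gave to me:")

def song (verso1 : Int) (verso2 : Int) : List String :=
  (PySem.List.pyRange (verso1 - 1) verso2 1).foldl
    (fun canzone giorno => canzone ++ [verseA giorno]) []

-- ===== PORT B =====
def song_alt (verso1 : Int) (verso2 : Int) : List String :=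
  let start := max (verso1 - 1) 0
  let init := PySem.Str.join "" (PySem.List.slice regaliA none (some start)).reverse
  ((PySem.List.pyRange start verso2 1).foldl
    (fun st giorno =>
      let fr := PySem.List.pyGetD regaliA giorno "" ++ st.1
      (fr, st.2 ++ ["On the " ++ PySem.List.pyGetD giorniA giorno "" ++ " day of Christmas my true love gave to me:" ++ fr]))
    (init, ([] : List String))).2

-- ===== PRECONDITION & SPEC =====
-- Pre_ excludes exactly the inputs where A raises IndexError: a nonempty day range reaching an
-- index outside -12..11 of the 12-element gift/day lists.
def Pre_song (verso1 : Int) (verso2 : Int) : Prop :=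
  verso2 ≤ verso1 - 1 ∨ (-12 ≤ verso1 - 1 ∧ verso2 ≤ 12)
instance (verso1 : Int) (verso2 : Int) : Decidable (Pre_song verso1 verso2) := by
  unfold Pre_song; infer_instance

def pvWitness_song : Int × Int := (1, 3)

-- On verso1 ≤ 0 with verso1 ≤ verso2, A's negative-index wraparound emits ghost verses (e.g.
-- "On the twelfth day … me:" with NO gifts) for the nonexistent days ≤ 0; B starts at day 1,
-- the intended first day of the song.
def D_song (verso1 : Int) (verso2 : Int) : Prop := verso1 ≤ 0 ∧ verso1 ≤ verso2
instance (verso1 : Int) (verso2 : Int) : Decidable (D_song verso1 verso2) := by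
  unfold D_song; infer_instance

def Spec_song (verso1 : Int) (verso2 : Int) (out : List String) : Prop :=
  ¬ D_song verso1 verso2 → out = song_alt verso1 verso2
instance (verso1 : Int) (verso2 : Int) (out : List String) : Decidable (Spec_song verso1 verso2 out) := by
  unfold Spec_song; infer_instance

def pvDiffWitness_song : Int × Int := (0, 1)
def pvDiffWitnessOut_song : (List String) × (List String) :=
  (["On the twelfth day of Christmas my true love gave to me:",
    "On the first day of Christmas my true love gave to me: a Partridge in a Pear Tree."],
   ["On the first day of Christmas my true love gave to me: a Partridge in a Pear Tree."])

-- ===== CLAIM (what is proved, stated in full; the proofs are below) =====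
def Claim_unchanged_song : Prop := ∀ (verso1 : Int) (verso2 : Int), Dom_song verso1 verso2 → Pre_song verso1 verso2 → Spec_song verso1 verso2 (song verso1 verso2)
def Claim_changed_song : Prop := Dom_song (pvDiffWitness_song.1) (pvDiffWitness_song.2) ∧ Pre_song (pvDiffWitness_song.1) (pvDiffWitness_song.2) ∧ D_song (pvDiffWitness_song.1) (pvDiffWitness_song.2) ∧ song (pvDiffWitness_song.1) (pvDiffWitness_song.2) = pvDiffWitnessOut_song.1 ∧ song_alt (pvDiffWitness_song.1) (pvDiffWitness_song.2) = pvDiffWitnessOut_song.2 ∧ pvDiffWitnessOut_song.1 ≠ pvDiffWitnessOut_song.2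
def Claim_exact_song : Prop := ∀ (verso1 : Int) (verso2 : Int), Dom_song verso1 verso2 → Pre_song verso1 verso2 → D_song verso1 verso2 → song verso1 verso2 ≠ song_alt verso1 verso2

-- ===== LEMMAS AND PROOFS =====

theorem length_song (verso1 verso2 : Int) :
    (song verso1 verso2).length = (verso2 - (verso1 - 1)).toNat := by
  unfold song
  rw [PySem.List.foldl_append_singleton_eq_map]
  simp [PySem.List.length_pyRange_one]

theorem snd_foldl_pair_length {α : Type} (f : (String × List α) → Int → String)
    (g : (String × List α) → Int → α) (l : List Int) (init : String) (acc : List α) :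
    ((l.foldl (fun st giorno => (f st giorno, st.2 ++ [g st giorno])) (init, acc)).2).length
      = acc.length + l.length := by
  induction l generalizing init acc with
  | nil => simp
  | cons x xs ih => simp [List.foldl_cons, ih]; omega

theorem length_song_alt (verso1 verso2 : Int) :
    (song_alt verso1 verso2).length = (verso2 - max (verso1 - 1) 0).toNat := by
  unfold song_alt
  rw [snd_foldl_pair_length]
  simp [PySem.List.length_pyRange_one]

-- ===== VERDICT (by name: the statement is the Claim_ definition above) =====
set_option maxRecDepth 100000 in
theorem song_spec : Claim_unchanged_song := by
  unfold Claim_unchanged_song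
  intro v1 v2 _ hpre hnd
  unfold D_song at hnd
  show song v1 v2 = song_alt v1 v2
  by_cases h : v2 ≤ v1 - 1
  · have ha : song v1 v2 = [] := List.length_eq_zero_iff.mp (by rw [length_song]; omega)
    have hb : song_alt v1 v2 = [] := List.length_eq_zero_iff.mp (by rw [length_song_alt]; omega)
    rw [ha, hb]
  · have hle : v1 ≤ v2 := by omega
    have h1 : 1 ≤ v1 := by by_contra hc; exact hnd ⟨by omega, hle⟩
    have h2 : v2 ≤ 12 := by
      rcases hpre with h' | ⟨_, h'⟩ <;> omega
    have h12 : v1 ≤ 12 := by omega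
    interval_cases v1 <;> interval_cases v2 <;> decide

set_option maxRecDepth 100000 in
theorem song_changed : Claim_changed_song := by
  unfold Claim_changed_song; decide

theorem song_tight : Claim_exact_song := by
  unfold Claim_exact_song
  intro v1 v2 _ _ hd heq
  unfold D_song at hd
  have h := congrArg List.length heq
  rw [length_song, length_song_alt] at h
  have hmax : max (v1 - 1) 0 = 0 := by omega
  rw [hmax] at h
  omega
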